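-- pv_equiv track=rewrite | github.com/Kevinbarre/advent-of-code-2023 | Day14/main.py | cycle_multiple_times
-- ===== SOURCE A (Python) =====
-- def transpose_grid(grid):
--     return [''.join(column) for column in zip(*grid)]
--
-- def sort_row(row, reverse):
--     return ''.join(sorted(row, reverse=reverse))
--
-- def sort_full_row(full_row, reverse=True):
--     return '#'.join(sort_row(row, reverse) for row in full_row.split('#'))
--
-- def tilt_north(grid):
--     transposed = transpose_grid(grid)
--     transposed = [sort_full_row(full_row) for full_row in transposed]
--     return transpose_grid(transposed)
--
-- def tilt_west(grid):
--     return [sort_full_row(full_row) for full_row in grid]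
--
-- def tilt_south(grid):
--     transposed = transpose_grid(grid)
--     transposed = [sort_full_row(full_row, False) for full_row in transposed]
--     return transpose_grid(transposed)
--
-- def tilt_east(grid):
--     return [sort_full_row(full_row, False) for full_row in grid]
--
-- def cycle_once(grid):
--     return tuple(tilt_east(tilt_south(tilt_west(tilt_north(grid)))))
--
-- def cycle_multiple_times(grid, nb_cycle):
--     new_grid = tuple(grid)
--     encountered_grids = {}
--     for i in range(nb_cycle):
--         if new_grid in encountered_grids:
--             # Cycle found, no need to compute anymore cycles
--             cycle_start = encountered_grids[new_grid]
--             cycle_length = i - cycle_start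
--             final_index = ((nb_cycle - cycle_start) % cycle_length) + cycle_start
--             target_grid = list(encountered_grids.keys())[
--                 list(encountered_grids.values()).index(final_index)]
--             return target_grid
--         else:
--             encountered_grids[new_grid] = i
--         new_grid = cycle_once(new_grid)
--     return new_grid
-- ===== SOURCE B (Python) =====
-- def _cols(grid):
--     # columns of the grid up to the shortest row (what zip(*grid) keeps)
--     if not grid:
--         return []
--     width = min(len(row) for row in grid)
--     return [''.join(row[i] for row in grid) for i in range(width)]
--
-- def _pack(seg, ascending):
--     # counting sort over the ASCII range instead of a comparison sort
--     counts = [0] * 128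
--     for c in seg:
--         counts[ord(c)] += 1
--     order = range(128) if ascending else range(127, -1, -1)
--     return ''.join(chr(v) * counts[v] for v in order)
--
-- def _shift(row, ascending):
--     return '#'.join(_pack(seg, ascending) for seg in row.split('#'))
--
-- def _spin(grid):
--     # one full tilt cycle: north, west, south, east
--     g = list(grid)
--     for vertical, ascending in ((True, False), (False, False), (True, True), (False, True)):
--         if vertical:
--             g = _cols(g)
--         g = [_shift(row, ascending) for row in g]
--         if vertical:
--             g = _cols(g)
--     return tuple(g)
--
-- def cycle_multiple_times(grid, nb_cycle):
--     # Floyd tortoise-and-hare cycle detection, O(1) extra memory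
--     start = tuple(grid)
--     slow = fast = start
--     met = False
--     steps = 0
--     while steps < nb_cycle:
--         slow = _spin(slow)
--         fast = _spin(_spin(fast))
--         steps += 1
--         if slow == fast:
--             met = True
--             break
--     if not met:
--         return slow
--     p, q = start, slow
--     mu = 0
--     while p != q:
--         p, q, mu = _spin(p), _spin(q), mu + 1
--     lam = 1
--     q = _spin(p)
--     while q != p:
--         q, lam = _spin(q), lam + 1
--     for _ in range((nb_cycle - mu) % lam):
--         p = _spin(p)
--     return p
-- ===== Notes on version B (the rewrite author's own statement) =====
-- stated objective: alternative
-- what changed: Every layer is re-implemented: A's hash-map memoization of seen grids (dict grid->index plus a values/keys scan) becomes Floyd tortoise-and-hare cycle detection in O(1) extra memory; zip(*grid) transposition becomes an index-based column build over the minimum row width; and the comparison sort of each '#'-segment becomes a counting sort over the 128-slot ASCII table.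
import Mathlib
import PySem

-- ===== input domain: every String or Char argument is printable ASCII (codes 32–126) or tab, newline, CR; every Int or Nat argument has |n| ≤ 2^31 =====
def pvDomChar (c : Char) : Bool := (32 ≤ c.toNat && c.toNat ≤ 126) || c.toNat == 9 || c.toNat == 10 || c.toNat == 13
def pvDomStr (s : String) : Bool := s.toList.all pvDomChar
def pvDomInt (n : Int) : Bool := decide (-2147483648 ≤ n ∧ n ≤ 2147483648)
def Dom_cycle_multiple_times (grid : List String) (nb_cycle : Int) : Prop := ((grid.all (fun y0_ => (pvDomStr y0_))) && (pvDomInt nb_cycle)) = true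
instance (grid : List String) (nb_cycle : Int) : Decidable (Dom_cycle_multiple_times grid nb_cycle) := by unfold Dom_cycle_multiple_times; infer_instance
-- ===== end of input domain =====

-- B replaces A's machinery at every level: hash-map memoization of seen grids becomes Floyd
-- tortoise-and-hare cycle detection (O(1) extra memory), zip(*grid) transposition becomes an
-- index-based column build, and the comparison sort of each '#'-segment becomes a counting sort.

-- ===== PORT A =====
-- zip(*grid): columns up to the shortest row (Python zip truncates; exact, hand-ported)
def pvZipAll : List (List Char) → List (List Char)
  | [] => []
  | r0 :: rest =>
    if h : ((r0 :: rest).all (fun r => !r.isEmpty)) then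
      ((r0 :: rest).map (fun r => r.headD ' ')) :: pvZipAll ((r0 :: rest).map List.tail)
    else []
termination_by rows => (rows.headD []).length
decreasing_by
  simp only [List.all_cons, Bool.and_eq_true, List.isEmpty_eq_false_iff, Bool.not_eq_eq_eq_not, Bool.not_true] at h
  simp only [List.map_cons, List.headD_cons]
  cases r0 with
  | nil => simp at h
  | cons c cs => simp [List.tail]

def transpose_gridL (grid : List String) : List String :=
  (pvZipAll (grid.map String.toList)).map (fun col => String.ofList col)

def sort_rowL (row : List Char) (rev : Bool) : String :=
  String.ofList (PySem.List.sorted row (fun c => c) rev)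

def sort_full_rowL (full_row : String) (rev : Bool) : String :=
  PySem.Str.join "#" ((PySem.Chars.splitOn full_row.toList "#".toList).map (fun r => sort_rowL r rev))

def tilt_northL (grid : List String) : List String :=
  transpose_gridL ((transpose_gridL grid).map (fun r => sort_full_rowL r true))

def tilt_westL (grid : List String) : List String :=
  grid.map (fun r => sort_full_rowL r true)

def tilt_southL (grid : List String) : List String :=
  transpose_gridL ((transpose_gridL grid).map (fun r => sort_full_rowL r false))

def tilt_eastL (grid : List String) : List String :=
  grid.map (fun r => sort_full_rowL r false)

def cycle_onceL (grid : List String) : List String :=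
  tilt_eastL (tilt_southL (tilt_westL (tilt_northL grid)))

-- the 'for i in range(nb_cycle)' loop of A, i counting up (lazy like Python's range)
def cmtLoopA (nb i : Int) (g : List String) (d : PySem.Dict (List String) Int) : List String :=
  if h : i < nb then
    match d.get? g with
    | some cycle_start =>
      let cycle_length := i - cycle_start
      let final_index := PySem.Int.mod (nb - cycle_start) cycle_length + cycle_start
      match PySem.List.index? d.values final_index with
      | some k => (PySem.List.pyGet? d.keys (k : Int)).getD []   -- .getD []: Python raises ValueError/IndexError only off this path (proved unreachable)
      | none => []
    | none => cmtLoopA nb (i + 1) (cycle_onceL g) (d.insert g i)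
  else g
termination_by (nb - i).toNat
decreasing_by omega

def cycle_multiple_times (grid : List String) (nb_cycle : Int) : List String :=
  cmtLoopA nb_cycle 0 grid PySem.Dict.empty

-- ===== PORT B =====
-- _cols(grid): index-based transposition — min row width, then one column per index
def colsB (grid : List String) : List String :=
  if grid = [] then []
  else
    let width := ((grid.map (fun row => row.toList.length)).min?).getD 0   -- min over a nonempty list; the default 0 is never consulted
    (List.range width).map (fun i =>
      String.ofList (grid.map (fun row => row.toList.getD i ' ')))   -- row[i] with i < width ≤ len(row): in range, so the ' ' default is never consulted

-- _pack(seg, ascending): counting sort over the ASCII range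
def packB (seg : List Char) (ascending : Bool) : List Char :=
  let counts := seg.foldl (fun cnt c => cnt.set c.toNat (cnt.getD c.toNat 0 + 1)) (List.replicate 128 0)
  let order := if ascending then List.range 128 else (List.range 128).reverse   -- range(128) / range(127, -1, -1)
  order.flatMap (fun v => List.replicate (counts.getD v 0) (Char.ofNat v))

def shiftB (row : String) (ascending : Bool) : String :=
  PySem.Str.join "#" ((PySem.Chars.splitOn row.toList "#".toList).map (fun seg => String.ofList (packB seg ascending)))

-- _spin(grid): one full tilt cycle as a fold over the four (vertical, ascending) direction pairs
def spinB (grid : List String) : List String :=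
  [(true, false), (false, false), (true, true), (false, true)].foldl
    (fun g dir =>
      let g1 := if dir.1 then colsB g else g
      let g2 := g1.map (fun row => shiftB row dir.2)
      if dir.1 then colsB g2 else g2) grid

-- tortoise-and-hare search, capped at nb_cycle slow steps (B's 'while steps < nb_cycle' loop)
def meetB : Nat → List String → List String → (List String × List String × Bool)
  | 0, slow, fast => (slow, fast, false)
  | fuel + 1, slow, fast =>
    let slow' := spinB slow
    let fast' := spinB (spinB fast)
    if slow' == fast' then (slow', fast', true) else meetB fuel slow' fast'

-- 'while p != q' loop locating the cycle start (fuel is a totality guard only; proved never exhausted)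
def muB : Nat → List String → List String → Nat → (List String × Nat)
  | 0, p, _, mu => (p, mu)
  | fuel + 1, p, q, mu =>
    if p == q then (p, mu) else muB fuel (spinB p) (spinB q) (mu + 1)

-- 'while q != p' loop measuring the cycle length (fuel is a totality guard only; proved never exhausted)
def lamB : Nat → List String → List String → Nat → Nat
  | 0, _, _, len => len
  | fuel + 1, p, q, len =>
    if q == p then len else lamB fuel p (spinB q) (len + 1)

-- 'for _ in range((nb_cycle - mu) % lam): p = _spin(p)'
def stepsB : Nat → List String → List String
  | 0, g => g
  | k + 1, g => stepsB k (spinB g)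

def cycle_multiple_times_alt (grid : List String) (nb_cycle : Int) : List String :=
  let res := meetB nb_cycle.toNat grid grid   -- (slow, fast, met)
  if res.2.2 then
    let pm := muB nb_cycle.toNat grid res.1 0   -- (p, mu)
    let lam := lamB nb_cycle.toNat pm.1 (spinB pm.1) 1
    stepsB (PySem.Int.mod (nb_cycle - (pm.2 : Int)) (lam : Int)).toNat pm.1
  else res.1

-- ===== PRECONDITION & SPEC =====
def Spec_cycle_multiple_times (grid : List String) (nb_cycle : Int) (out : List String) : Prop := out = cycle_multiple_times_alt grid nb_cycle
instance (grid : List String) (nb_cycle : Int) (out : List String) : Decidable (Spec_cycle_multiple_times grid nb_cycle out) := by unfold Spec_cycle_multiple_times; infer_instance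

-- ===== CLAIM (what is proved, stated in full; the proofs are below) =====
def Claim_equal_cycle_multiple_times : Prop := ∀ (grid : List String) (nb_cycle : Int), Dom_cycle_multiple_times grid nb_cycle → Spec_cycle_multiple_times grid nb_cycle (cycle_multiple_times grid nb_cycle)

-- ===== LEMMAS AND PROOFS =====

-- chars below code point 128 (everything Dom admits); counting sort is exact on them
def pvGoodS (s : String) : Prop := ∀ c ∈ s.toList, c.toNat < 128
def pvGoodG (g : List String) : Prop := ∀ s ∈ g, pvGoodS s

theorem pv_good_of_dom (grid : List String) (nb : Int)
    (h : Dom_cycle_multiple_times grid nb) : pvGoodG grid := by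
  unfold Dom_cycle_multiple_times at h
  simp only [Bool.and_eq_true, List.all_eq_true] at h
  intro s hs c hc
  have := h.1 s hs
  unfold pvDomStr at this
  simp only [List.all_eq_true] at this
  have := this c hc
  unfold pvDomChar at this
  simp only [Bool.or_eq_true, Bool.and_eq_true, beq_iff_eq, decide_eq_true_eq] at this
  omega

-- ----- transposition: colsB = transpose_gridL -----
theorem pv_min_map_pred (l : List Nat) :
    (l.map (fun x => x - 1)).min? = l.min?.map (fun x => x - 1) := by
  induction l with
  | nil => rfl
  | cons a t ih =>
    rw [List.map_cons, List.min?_cons, List.min?_cons, ih]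
    cases h : t.min? with
    | none => rfl
    | some m => simp [Option.map, Nat.sub_min_sub_right]

theorem pv_zip_eq : ∀ (n : Nat) (rows : List (List Char)),
    ((rows.map List.length).min?).getD 0 = n →
    pvZipAll rows = (List.range n).map (fun i => rows.map (fun r => r.getD i ' ')) := by
  intro n
  induction n with
  | zero =>
    intro rows hm
    cases rows with
    | nil => simp [pvZipAll]
    | cons r0 rest =>
      rw [pvZipAll]
      rw [dif_neg]
      · simp
      · intro hall
        simp only [List.all_eq_true, Bool.not_eq_eq_eq_not, Bool.not_true, List.isEmpty_eq_false_iff] at hall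
        cases h : ((r0 :: rest).map List.length).min? with
        | none => simp at h
        | some m =>
          have hmem := List.min?_mem h
          obtain ⟨r, hr, hlen⟩ := List.mem_map.mp hmem
          have := hall r hr
          rw [h] at hm
          simp at hm
          subst hm
          exact this (List.eq_nil_of_length_eq_zero hlen)
  | succ k ih =>
    intro rows hm
    cases rows with
    | nil => simp at hm
    | cons r0 rest =>
      have hall : ((r0 :: rest).all (fun r => !r.isEmpty)) = true := by
        simp only [List.all_eq_true, Bool.not_eq_eq_eq_not, Bool.not_true, List.isEmpty_eq_false_iff]
        intro r hr
        intro hnil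
        have hmle : ∀ a ∈ (r0 :: rest).map List.length, ((((r0 :: rest).map List.length).min?).getD 0) ≤ a := by
          intro a ha
          cases h : ((r0 :: rest).map List.length).min? with
          | none => simp at h
          | some m =>
            rw [List.min?_eq_some_iff] at h
            simp [h.2 a ha]
        have := hmle 0 (List.mem_map.mpr ⟨r, hr, by simp [hnil]⟩)
        omega
      rw [pvZipAll, dif_pos hall]
      have htails : (((r0 :: rest).map List.tail).map List.length).min? = some k := by
        have : ((r0 :: rest).map List.tail).map List.length = ((r0 :: rest).map List.length).map (fun x => x - 1) := by
          simp [List.map_map, List.length_tail]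
        rw [this, pv_min_map_pred]
        cases h : ((r0 :: rest).map List.length).min? with
        | none => simp at h
        | some m =>
          rw [h] at hm
          simp only [Option.getD_some] at hm
          simp [hm]
      have hhd : ∀ r : List Char, r.headD ' ' = r.getD 0 ' ' := by
        intro r; cases r <;> rfl
      have htl : ∀ (i : Nat) (r : List Char), r.tail.getD i ' ' = r.getD (i + 1) ' ' := by
        intro i r; cases r <;> rfl
      rw [ih _ (by rw [htails]; rfl)]
      rw [List.range_succ_eq_map]
      simp only [List.map_cons, List.map_map]
      congr 1
      · simp only [hhd]
      · apply List.map_congr_left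
        intro i _
        simp only [Function.comp_def, htl, Nat.succ_eq_add_one]

theorem pv_cols_eq (g : List String) : colsB g = transpose_gridL g := by
  unfold colsB transpose_gridL
  by_cases hg : g = []
  · subst hg; simp [pvZipAll]
  · rw [if_neg hg]
    rw [pv_zip_eq (((g.map (fun row => row.toList.length)).min?).getD 0) (g.map String.toList)
        (by rw [List.map_map]; rfl)]
    simp [List.map_map, Function.comp_def]

theorem pv_toNat_ofNat (n : Nat) (h : n < 128) : (Char.ofNat n).toNat = n := by
  rw [Char.toNat_ofNat, if_pos (Or.inl (by omega))]

theorem pv_ofNat_inj_eq (c : Char) (v : Nat) (hv : v < 128) (hc : c.toNat < 128) :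
    (c = Char.ofNat v) ↔ (c.toNat = v) := by
  constructor
  · intro h; rw [h, pv_toNat_ofNat v hv]
  · intro h; rw [← h, Char.ofNat_toNat]

theorem pv_cnt_spec (seg : List Char) (hgood : ∀ c ∈ seg, c.toNat < 128) :
    ∀ (b : List Nat), b.length = 128 → ∀ v, v < 128 →
      (seg.foldl (fun cnt c => cnt.set c.toNat (cnt.getD c.toNat 0 + 1)) b).getD v 0
        = b.getD v 0 + seg.count (Char.ofNat v) := by
  induction seg with
  | nil => intro b _ v _; simp
  | cons c t ih =>
    intro b hb v hv
    have hc : c.toNat < 128 := hgood c (by simp)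
    rw [List.foldl_cons]
    rw [ih (fun x hx => hgood x (by simp [hx])) _ (by simp [hb]) v hv]
    have hset : (b.set c.toNat (b.getD c.toNat 0 + 1)).getD v 0
        = b.getD v 0 + (if c.toNat = v then 1 else 0) := by
      by_cases h : c.toNat = v
      · subst h
        rw [List.getD_eq_getElem?_getD, List.getElem?_set_self (by omega), if_pos rfl]
        simp [List.getD_eq_getElem?_getD]
      · rw [List.getD_eq_getElem?_getD, List.getElem?_set_ne h, if_neg h]
        simp [List.getD_eq_getElem?_getD]
    rw [hset, List.count_cons]
    have : (c == Char.ofNat v) = (if c.toNat = v then true else false) := by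
      by_cases h : c.toNat = v
      · rw [if_pos h, beq_iff_eq]
        exact (pv_ofNat_inj_eq c v hv hc).mpr h
      · simp only [if_neg h]
        simp only [beq_eq_false_iff_ne, ne_eq]
        intro hcv
        exact h ((pv_ofNat_inj_eq c v hv hc).mp hcv)
    rw [this]
    by_cases h : c.toNat = v <;> simp [h] <;> omega

theorem pv_char_toNat_inj (a b : Char) (h : a.toNat = b.toNat) : a = b := by
  apply Char.ext
  apply UInt32.toBitVec_inj.mp
  apply BitVec.toNat_inj.mp
  exact h

theorem pv_sum_if (f : Nat → Nat) (t : Nat) : ∀ (n : Nat), t < n →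
    ((List.range n).map (fun v => if v = t then f v else 0)).sum = f t := by
  intro n
  induction n with
  | zero => omega
  | succ k ih =>
    intro ht
    rw [List.range_succ, List.map_append, List.sum_append]
    by_cases h : t < k
    · rw [ih h]
      simp
      omega
    · have htk : t = k := by omega
      subst htk
      rw [List.sum_eq_zero (by
        intro x hx
        obtain ⟨v, hv, rfl⟩ := List.mem_map.mp hx
        rw [List.mem_range] at hv
        rw [if_neg (by omega)])]
      simp

theorem pv_count_flat (seg : List Char) (hgood : ∀ c ∈ seg, c.toNat < 128)
    (order : List Nat) (hperm : order.Perm (List.range 128)) (a : Char) :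
    (order.flatMap (fun v => List.replicate
        ((seg.foldl (fun cnt c => cnt.set c.toNat (cnt.getD c.toNat 0 + 1)) (List.replicate 128 0)).getD v 0)
        (Char.ofNat v))).count a = seg.count a := by
  set cnt := seg.foldl (fun cnt c => cnt.set c.toNat (cnt.getD c.toNat 0 + 1)) (List.replicate 128 0) with hcnt
  have hcv : ∀ v, v < 128 → cnt.getD v 0 = seg.count (Char.ofNat v) := by
    intro v hv
    rw [hcnt, pv_cnt_spec seg hgood _ (by simp) v hv]
    rw [List.getD_eq_getElem?_getD, List.getElem?_replicate, if_pos hv]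
    simp
  rw [List.count_flatMap]
  rw [List.Perm.sum_nat (List.Perm.map _ hperm)]
  by_cases ha : a.toNat < 128
  · have : ((List.range 128).map
        ((List.count a) ∘ (fun v => List.replicate (cnt.getD v 0) (Char.ofNat v))))
        = (List.range 128).map (fun v => if v = a.toNat then seg.count a else 0) := by
      apply List.map_congr_left
      intro v hv
      rw [List.mem_range] at hv
      simp only [Function.comp_apply, List.count_replicate]
      by_cases h : v = a.toNat
      · subst h
        rw [if_pos (by rw [beq_iff_eq, Char.ofNat_toNat]), if_pos rfl, hcv _ hv, Char.ofNat_toNat]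
      · rw [if_neg (by
          rw [beq_iff_eq]
          intro hh
          exact h (by rw [← hh, pv_toNat_ofNat v hv])), if_neg h]
    rw [this, pv_sum_if _ _ _ ha]
  · rw [List.sum_eq_zero, Eq.comm, List.count_eq_zero]
    · intro hmem
      exact absurd (hgood a hmem) ha
    · intro x hx
      obtain ⟨v, hv, rfl⟩ := List.mem_map.mp hx
      rw [List.mem_range] at hv
      simp only [Function.comp_apply, List.count_replicate]
      rw [if_neg]
      rw [beq_iff_eq]
      intro hh
      rw [← hh] at ha
      exact ha (by rw [pv_toNat_ofNat v hv]; exact hv)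

theorem pv_pack_perm (seg : List Char) (asc : Bool) (hgood : ∀ c ∈ seg, c.toNat < 128) :
    (packB seg asc).Perm seg := by
  rw [List.perm_iff_count]
  intro a
  unfold packB
  cases asc
  · exact pv_count_flat seg hgood _ (List.reverse_perm _) a
  · exact pv_count_flat seg hgood _ (List.Perm.refl _) a

theorem pv_pack_pairwise_asc (seg : List Char) :
    (packB seg true).Pairwise (fun x y => x ≤ y) := by
  unfold packB
  simp only [if_pos]
  rw [List.pairwise_flatMap]
  constructor
  · intro v _
    rw [List.pairwise_replicate]
    exact Or.inr (le_refl _)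
  · rw [List.pairwise_iff_getElem]
    intro i j hi hj hij
    intro x hx y hy
    rw [List.eq_of_mem_replicate hx, List.eq_of_mem_replicate hy]
    rw [List.getElem_range, List.getElem_range]
    show (Char.ofNat i).toNat ≤ (Char.ofNat j).toNat
    rw [pv_toNat_ofNat i (by simpa using hi), pv_toNat_ofNat j (by simpa using hj)]
    omega

theorem pv_pack_pairwise_desc (seg : List Char) :
    (packB seg false).Pairwise (fun x y => y ≤ x) := by
  unfold packB
  simp only [Bool.false_eq_true, if_neg, if_false]
  rw [List.pairwise_flatMap]
  constructor
  · intro v _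
    rw [List.pairwise_replicate]
    exact Or.inr (le_refl _)
  · rw [List.pairwise_iff_getElem]
    intro i j hi hj hij
    intro x hx y hy
    rw [List.eq_of_mem_replicate hx, List.eq_of_mem_replicate hy]
    simp only [List.length_reverse, List.length_range] at hi hj
    rw [List.getElem_reverse, List.getElem_reverse]
    simp only [List.length_range]
    rw [List.getElem_range, List.getElem_range]
    show (Char.ofNat (128 - 1 - j)).toNat ≤ (Char.ofNat (128 - 1 - i)).toNat
    rw [pv_toNat_ofNat _ (by omega), pv_toNat_ofNat _ (by omega)]
    omega

theorem pv_pack_eq (seg : List Char) (asc : Bool) (hgood : ∀ c ∈ seg, c.toNat < 128) :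
    packB seg asc = PySem.List.sorted seg (fun c => c) (!asc) := by
  cases asc
  · -- descending
    apply PySem.List.eq_of_perm_of_pairwise_le_of_injective (fun c : Char => -(c.toNat : Int))
    · intro a b h
      simp only [neg_inj, Nat.cast_inj] at h
      exact pv_char_toNat_inj a b h
    · exact (pv_pack_perm seg false hgood).trans (PySem.List.sorted_perm seg (fun c => c) true).symm
    · exact (pv_pack_pairwise_desc seg).imp (by intro a b h; simp; exact h)
    · exact (PySem.List.sorted_pairwise_rev seg (fun c => c)).imp (by intro a b h; simp; exact h)
  · -- ascending
    exact (PySem.List.sorted_id_eq_of_perm_of_pairwise seg (packB seg true)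
      (pv_pack_perm seg true hgood) (pv_pack_pairwise_asc seg)).symm

theorem pv_mem_intersperse {α : Type} (sep : α) : ∀ (l : List α) (x : α),
    x ∈ l.intersperse sep → x = sep ∨ x ∈ l := by
  intro l
  induction l with
  | nil => intro x hx; simp at hx
  | cons a t ih =>
    intro x hx
    cases t with
    | nil => simp at hx; simp [hx]
    | cons b u =>
      rw [show (a :: b :: u).intersperse sep = a :: sep :: ((b :: u).intersperse sep) from by simp] at hx
      rcases List.mem_cons.mp hx with h1 | hx2
      · exact Or.inr (by simp [h1])
      · rcases List.mem_cons.mp hx2 with h1 | hx3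
        · exact Or.inl h1
        · rcases ih x hx3 with h | h
          · exact Or.inl h
          · exact Or.inr (by simp [h])

theorem pv_mem_join (sep : List Char) (parts : List (List Char)) (c : Char)
    (h : c ∈ PySem.Chars.join sep parts) : c ∈ sep ∨ ∃ p ∈ parts, c ∈ p := by
  unfold PySem.Chars.join at h
  rw [List.intercalate, List.mem_flatten] at h
  obtain ⟨l, hl, hc⟩ := h
  rcases pv_mem_intersperse sep parts l hl with h | h
  · subst h; exact Or.inl hc
  · exact Or.inr ⟨l, h, hc⟩

-- chars of every '#'-segment of a row are chars of the row
theorem pv_go_mem (sep : List Char) : ∀ (fuel : Nat) (l cur : List Char) (acc : List (List Char))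
    (seg : List Char) (c : Char), seg ∈ PySem.Chars.splitOn.go sep fuel l cur acc → c ∈ seg →
    c ∈ l ∨ c ∈ cur ∨ ∃ s ∈ acc, c ∈ s := by
  intro fuel
  induction fuel with
  | zero =>
    intro l cur acc seg c hseg hc
    rw [show PySem.Chars.splitOn.go sep 0 l cur acc = ((cur.reverse ++ l) :: acc).reverse from rfl] at hseg
    simp only [List.mem_reverse, List.mem_cons] at hseg
    rcases hseg with h | h
    · subst h; simp at hc; rcases hc with h|h
      · exact Or.inr (Or.inl h)
      · exact Or.inl h
    · exact Or.inr (Or.inr ⟨seg, h, hc⟩)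
  | succ fuel ih =>
    intro l cur acc seg c hseg hc
    cases l with
    | nil =>
      rw [show PySem.Chars.splitOn.go sep (fuel+1) [] cur acc = (cur.reverse :: acc).reverse from rfl] at hseg
      simp only [List.mem_reverse, List.mem_cons] at hseg
      rcases hseg with h | h
      · subst h; simp at hc; exact Or.inr (Or.inl hc)
      · exact Or.inr (Or.inr ⟨seg, h, hc⟩)
    | cons x rest =>
      rw [show PySem.Chars.splitOn.go sep (fuel+1) (x :: rest) cur acc = (if sep.isPrefixOf (x :: rest) = true then PySem.Chars.splitOn.go sep fuel (List.drop sep.length (x :: rest)) [] (cur.reverse :: acc) else PySem.Chars.splitOn.go sep fuel rest (x :: cur) acc) from rfl] at hseg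
      by_cases hp : sep.isPrefixOf (x :: rest) = true
      · rw [if_pos hp] at hseg
        rcases ih _ _ _ seg c hseg hc with h | h | h
        · exact Or.inl (List.mem_of_mem_drop h)
        · simp at h
        · simp only [List.mem_cons] at h
          rcases h with ⟨s, hs | hs, hcs⟩
          · subst hs; simp at hcs; exact Or.inr (Or.inl hcs)
          · exact Or.inr (Or.inr ⟨s, hs, hcs⟩)
      · rw [if_neg hp] at hseg
        rcases ih _ _ _ seg c hseg hc with h | h | h
        · exact Or.inl (List.mem_cons_of_mem _ h)
        · simp only [List.mem_cons] at h
          rcases h with h | h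
          · exact Or.inl (by simp [h])
          · exact Or.inr (Or.inl h)
        · exact Or.inr (Or.inr h)

theorem pv_mem_of_mem_splitOn (s sep seg : List Char) (c : Char)
    (hseg : seg ∈ PySem.Chars.splitOn s sep) (hc : c ∈ seg) : c ∈ s := by
  rcases pv_go_mem sep (s.length + 1) s [] [] seg c hseg hc with h | h | h
  · exact h
  · simp at h
  · simp at h

theorem pv_shift_eq (row : String) (asc : Bool) (hgood : pvGoodS row) :
    shiftB row asc = sort_full_rowL row (!asc) := by
  unfold shiftB sort_full_rowL
  congr 1
  apply List.map_congr_left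
  intro seg hseg
  rw [pv_pack_eq seg asc (fun c hc => hgood c (pv_mem_of_mem_splitOn _ _ _ _ hseg hc))]
  rfl

-- ----- goodness preservation -----
theorem pv_pack_good (seg : List Char) (asc : Bool) : ∀ c ∈ packB seg asc, c.toNat < 128 := by
  intro c hc
  unfold packB at hc
  rw [List.mem_flatMap] at hc
  obtain ⟨v, hv, hcv⟩ := hc
  have hv128 : v < 128 := by
    cases asc <;> simp at hv <;> omega
  rw [List.eq_of_mem_replicate hcv, pv_toNat_ofNat v hv128]
  exact hv128

theorem pv_shift_good (row : String) (asc : Bool) : pvGoodS (shiftB row asc) := by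
  intro c hc
  unfold shiftB at hc
  unfold PySem.Str.join at hc
  rw [String.toList_ofList] at hc
  rcases pv_mem_join _ _ _ hc with h | ⟨p, hp, hcp⟩
  · simp at h
    rw [h]
    decide
  · obtain ⟨q, hq, rfl⟩ := List.mem_map.mp hp
    obtain ⟨seg, hseg, rfl⟩ := List.mem_map.mp hq
    rw [String.toList_ofList] at hcp
    exact pv_pack_good seg asc c hcp

theorem pv_map_shift_good (l : List String) (asc : Bool) :
    pvGoodG (l.map (fun row => shiftB row asc)) := by
  intro s hs
  obtain ⟨r, _, rfl⟩ := List.mem_map.mp hs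
  exact pv_shift_good r asc

theorem pv_cols_good (g : List String) (h : pvGoodG g) : pvGoodG (colsB g) := by
  unfold colsB
  by_cases hg : g = []
  · simp [hg, pvGoodG]
  · rw [if_neg hg]
    intro s hs
    obtain ⟨i, _, rfl⟩ := List.mem_map.mp hs
    intro c hc
    rw [String.toList_ofList] at hc
    obtain ⟨row, hrow, hcr⟩ := List.mem_map.mp hc
    rcases hgd : row.toList[i]? with _ | x
    · rw [List.getD_eq_getElem?_getD, hgd] at hcr
      simp at hcr
      rw [← hcr]
      decide
    · rw [List.getD_eq_getElem?_getD, hgd] at hcr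
      simp at hcr
      rw [← hcr]
      exact h row hrow x (List.mem_of_getElem? hgd)

-- ----- one spin equals one of A's cycles on good grids -----
theorem pv_spin_eq (g : List String) (h : pvGoodG g) : spinB g = cycle_onceL g := by
  have step : ∀ (x : List String), pvGoodG x → ∀ b : Bool,
      colsB ((colsB x).map (fun row => shiftB row b)) = transpose_gridL ((transpose_gridL x).map (fun r => sort_full_rowL r (!b))) := by
    intro x hx b
    rw [pv_cols_eq]
    congr 1
    rw [← pv_cols_eq]
    apply List.map_congr_left
    intro r hr
    exact pv_shift_eq r b (pv_cols_good x hx r hr)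
  have stepw : ∀ (x : List String), pvGoodG x → ∀ b : Bool,
      x.map (fun row => shiftB row b) = x.map (fun r => sort_full_rowL r (!b)) := by
    intro x hx b
    apply List.map_congr_left
    intro r hr
    exact pv_shift_eq r b (hx r hr)
  have h1 : colsB ((colsB g).map (fun row => shiftB row false))
      = transpose_gridL ((transpose_gridL g).map (fun r => sort_full_rowL r true)) := by
    rw [step g h false]
    rfl
  have hg1 : pvGoodG (colsB ((colsB g).map (fun row => shiftB row false))) :=
    pv_cols_good _ (pv_map_shift_good _ _)
  have h2 : (colsB ((colsB g).map (fun row => shiftB row false))).map (fun row => shiftB row false)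
      = (transpose_gridL ((transpose_gridL g).map (fun r => sort_full_rowL r true))).map (fun r => sort_full_rowL r true) := by
    rw [stepw _ hg1 false, h1]
    rfl
  have hg2 : pvGoodG ((colsB ((colsB g).map (fun row => shiftB row false))).map (fun row => shiftB row false)) :=
    pv_map_shift_good _ _
  have h3 : colsB ((colsB ((colsB ((colsB g).map (fun row => shiftB row false))).map (fun row => shiftB row false))).map (fun row => shiftB row true))
      = transpose_gridL ((transpose_gridL ((transpose_gridL ((transpose_gridL g).map (fun r => sort_full_rowL r true))).map (fun r => sort_full_rowL r true))).map (fun r => sort_full_rowL r false)) := by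
    rw [step _ hg2 true, h2]
    rfl
  have hg3 : pvGoodG (colsB ((colsB ((colsB ((colsB g).map (fun row => shiftB row false))).map (fun row => shiftB row false))).map (fun row => shiftB row true))) :=
    pv_cols_good _ (pv_map_shift_good _ _)
  have h4 : (colsB ((colsB ((colsB ((colsB g).map (fun row => shiftB row false))).map (fun row => shiftB row false))).map (fun row => shiftB row true))).map (fun row => shiftB row true)
      = (transpose_gridL ((transpose_gridL ((transpose_gridL ((transpose_gridL g).map (fun r => sort_full_rowL r true))).map (fun r => sort_full_rowL r true))).map (fun r => sort_full_rowL r false))).map (fun r => sort_full_rowL r false) := by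
    rw [stepw _ hg3 true, h3]
    rfl
  show (colsB ((colsB ((colsB ((colsB g).map (fun row => shiftB row false))).map (fun row => shiftB row false))).map (fun row => shiftB row true))).map (fun row => shiftB row true) = cycle_onceL g
  rw [h4]
  rfl

theorem pv_spin_good (g : List String) : pvGoodG (spinB g) := by
  show pvGoodG ((colsB ((colsB ((colsB ((colsB g).map (fun row => shiftB row false))).map (fun row => shiftB row false))).map (fun row => shiftB row true))).map (fun row => shiftB row true))
  exact pv_map_shift_good _ _

theorem pv_iter_eq : ∀ (n : Nat) (g : List String), pvGoodG g → spinB^[n] g = cycle_onceL^[n] g := by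
  intro n
  induction n with
  | zero => intro g _; rfl
  | succ n ih =>
    intro g hg
    rw [Function.iterate_succ_apply, Function.iterate_succ_apply,
        ih (spinB g) (pv_spin_good g), pv_spin_eq g hg]

-- ----- the modular shortcut both programs take -----
theorem pv_periodic_shortcut {α : Type} (f : α → α) (s : α) (a d m : Nat)
    (hd : 1 ≤ d) (hp : f^[a + d] s = f^[a] s) (ham : a ≤ m) :
    f^[a + (m - a) % d] s = f^[m] s := by
  have hstep : ∀ c, f^[c + a + d] s = f^[c + a] s := by
    intro c
    rw [show c + a + d = c + (a + d) from by omega, Function.iterate_add_apply f c (a + d) s,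
        Function.iterate_add_apply f c a s, hp]
  have hper : ∀ q r, f^[a + r + q * d] s = f^[a + r] s := by
    intro q r
    induction q with
    | zero => simp
    | succ q ih =>
      have h1 := hstep (r + q * d)
      rw [show a + r + (q + 1) * d = r + q * d + a + d from by rw [Nat.succ_mul]; omega, h1,
          show r + q * d + a = a + r + q * d from by omega, ih]
  have hm : m = a + (m - a) % d + ((m - a) / d) * d := by
    have key := Nat.mod_add_div' (m - a) d; omega
  calc f^[a + (m - a) % d] s = f^[a + (m - a) % d + ((m - a) / d) * d] s := (hper _ _).symm
    _ = f^[m] s := by rw [← hm]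

theorem pv_stepsB (k : Nat) (g : List String) : stepsB k g = spinB^[k] g := by
  induction k generalizing g with
  | zero => rfl
  | succ k ih => rw [stepsB, ih, ← Function.iterate_succ_apply]

theorem pv_meet_spec (s : List String) :
    ∀ (fuel a : Nat),
      (∃ t0, a < t0 ∧ t0 ≤ a + fuel ∧
        meetB fuel (spinB^[a] s) (spinB^[2 * a] s)
          = (spinB^[t0] s, spinB^[2 * t0] s, true) ∧
        spinB^[t0] s = spinB^[2 * t0] s)
      ∨ meetB fuel (spinB^[a] s) (spinB^[2 * a] s)
          = (spinB^[a + fuel] s, spinB^[2 * (a + fuel)] s, false) := by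
  intro fuel
  induction fuel with
  | zero => intro a; right; simp [meetB]
  | succ fuel ih =>
    intro a
    have hs : spinB (spinB^[a] s) = spinB^[a + 1] s :=
      (Function.iterate_succ_apply' _ _ _).symm
    have hf : spinB (spinB (spinB^[2 * a] s)) = spinB^[2 * (a + 1)] s := by
      rw [show 2 * (a + 1) = 2 * a + 1 + 1 from by omega,
          Function.iterate_succ_apply' spinB (2 * a + 1) s,
          Function.iterate_succ_apply' spinB (2 * a) s]
    by_cases hbe : spinB^[a + 1] s = spinB^[2 * (a + 1)] s
    · left
      refine ⟨a + 1, by omega, by omega, ?_, hbe⟩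
      simp only [meetB, hs, hf]
      simp [hbe]
    · have hne : (spinB^[a + 1] s == spinB^[2 * (a + 1)] s) = false := by
        simpa using hbe
      have hrec : meetB (fuel + 1) (spinB^[a] s) (spinB^[2 * a] s)
          = meetB fuel (spinB^[a + 1] s) (spinB^[2 * (a + 1)] s) := by
        simp only [meetB, hs, hf, hne, Bool.false_eq_true, if_false]
      rw [hrec]
      rcases ih (a + 1) with ⟨t0, h1, h2, h3, h4⟩ | h
      · exact Or.inl ⟨t0, by omega, by omega, h3, h4⟩
      · right
        rw [h, show a + 1 + fuel = a + (fuel + 1) from by omega]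

theorem pv_mu_spec (s : List String) (t0 : Nat) :
    ∀ (fuel m : Nat),
      (∃ j0, j0 ≤ fuel ∧ spinB^[m + j0] s = spinB^[t0 + (m + j0)] s) →
      ∃ mu, m ≤ mu ∧ mu ≤ m + fuel ∧
        muB fuel (spinB^[m] s) (spinB^[t0 + m] s) m = (spinB^[mu] s, mu) ∧
        spinB^[mu] s = spinB^[t0 + mu] s := by
  intro fuel
  induction fuel with
  | zero =>
    intro m ⟨j0, hj0, hj⟩
    have : j0 = 0 := by omega
    subst this
    exact ⟨m, le_refl m, by omega, rfl, by simpa using hj⟩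
  | succ fuel ih =>
    intro m ⟨j0, hj0, hj⟩
    by_cases heq : spinB^[m] s = spinB^[t0 + m] s
    · refine ⟨m, le_refl m, by omega, ?_, heq⟩
      simp only [muB]
      simp [heq]
    · have hne : (spinB^[m] s == spinB^[t0 + m] s) = false := by simpa using heq
      have hj0' : j0 ≠ 0 := by rintro rfl; exact heq (by simpa using hj)
      have hstep : muB (fuel + 1) (spinB^[m] s) (spinB^[t0 + m] s) m
          = muB fuel (spinB^[m + 1] s) (spinB^[t0 + (m + 1)] s) (m + 1) := by
        simp only [muB, hne, Bool.false_eq_true, if_false,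
          ← Function.iterate_succ_apply' spinB m s,
          ← Function.iterate_succ_apply' spinB (t0 + m) s,
          Nat.succ_eq_add_one, Nat.add_assoc]
      rcases ih (m + 1) ⟨j0 - 1, by omega, by
        rw [show m + 1 + (j0 - 1) = m + j0 from by omega]; exact hj⟩ with ⟨mu, h1, h2, h3, h4⟩
      exact ⟨mu, by omega, by omega, by rw [hstep]; exact h3, h4⟩

theorem pv_lam_spec (s : List String) (mu : Nat) :
    ∀ (fuel len : Nat), 1 ≤ len →
      (∃ j0, j0 ≤ fuel ∧ spinB^[mu + (len + j0)] s = spinB^[mu] s) →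
      ∃ lam, len ≤ lam ∧
        lamB fuel (spinB^[mu] s) (spinB^[mu + len] s) len = lam ∧
        spinB^[mu + lam] s = spinB^[mu] s := by
  intro fuel
  induction fuel with
  | zero =>
    intro len _ ⟨j0, hj0, hj⟩
    have : j0 = 0 := by omega
    subst this
    exact ⟨len, le_refl len, rfl, by simpa using hj⟩
  | succ fuel ih =>
    intro len hlen ⟨j0, hj0, hj⟩
    by_cases heq : spinB^[mu + len] s = spinB^[mu] s
    · refine ⟨len, le_refl len, ?_, heq⟩
      simp only [lamB]
      simp [heq]
    · have hne : (spinB^[mu + len] s == spinB^[mu] s) = false := by simpa using heq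
      have hj0' : j0 ≠ 0 := by rintro rfl; exact heq (by simpa using hj)
      have hstep : lamB (fuel + 1) (spinB^[mu] s) (spinB^[mu + len] s) len
          = lamB fuel (spinB^[mu] s) (spinB^[mu + (len + 1)] s) (len + 1) := by
        simp only [lamB, hne, Bool.false_eq_true, if_false,
          show mu + (len + 1) = (mu + len) + 1 from by omega,
          ← Function.iterate_succ_apply' spinB (mu + len) s]
      rcases ih (len + 1) (by omega) ⟨j0 - 1, by omega, by
        rw [show mu + (len + 1 + (j0 - 1)) = mu + (len + j0) from by omega]; exact hj⟩ with
        ⟨lam, h1, h2, h3⟩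
      exact ⟨lam, by omega, by rw [hstep]; exact h2, h3⟩

-- ----- A's dict bookkeeping -----
theorem pv_get?_mk_eq_none {κ ν : Type} [BEq κ] [LawfulBEq κ] (L : List (κ × ν)) (x : κ)
    (h : ∀ p ∈ L, p.1 ≠ x) : (PySem.Dict.mk L).get? x = none := by
  induction L with
  | nil => rfl
  | cons p rest ih =>
    rw [PySem.Dict.get?_mk_cons]
    have hne : (p.1 == x) = false := by simpa using h p (by simp)
    simp only [hne, Bool.false_eq_true, if_false]
    exact ih (fun q hq => h q (by simp [hq]))

theorem pv_get?_mk_append_self {κ ν : Type} [BEq κ] [LawfulBEq κ] (L1 L2 : List (κ × ν)) (x : κ) (v : ν)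
    (h : ∀ p ∈ L1, p.1 ≠ x) : (PySem.Dict.mk (L1 ++ (x, v) :: L2)).get? x = some v := by
  induction L1 with
  | nil => rw [List.nil_append, PySem.Dict.get?_mk_cons]; simp
  | cons p rest ih =>
    rw [List.cons_append, PySem.Dict.get?_mk_cons]
    have hne : (p.1 == x) = false := by simpa using h p (by simp)
    simp only [hne, Bool.false_eq_true, if_false]
    exact ih (fun q hq => h q (by simp [hq]))

theorem pv_range_split (k m : Nat) (hm : m < k) :
    List.range k = List.range m ++ m :: (List.range (k - m - 1)).map (fun i => m + 1 + i) := by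
  rw [show k = (m + 1) + (k - m - 1) from by omega, List.range_add, List.range_succ]
  rw [show m + 1 + (k - m - 1) - m - 1 = k - m - 1 from by omega]
  simp [List.append_assoc]

theorem pv_index?_map_natCast (k m : Nat) (hm : m < k) :
    PySem.List.index? ((List.range k).map (fun (j : Nat) => (j : Int))) (m : Int) = some m := by
  have hr := pv_range_split k m hm
  rw [PySem.List.index?_eq_some_iff]
  refine ⟨(List.range m).map (fun (j : Nat) => (j : Int)),
    ((List.range (k - m - 1)).map (fun i => m + 1 + i)).map (fun (j : Nat) => (j : Int)), ?_, by simp, ?_⟩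
  · rw [hr]; simp
  · intro hmem
    obtain ⟨j, hj, hje⟩ := List.mem_map.mp hmem
    rw [List.mem_range] at hj
    have hjm : j = m := by exact_mod_cast hje
    omega

theorem pv_loopA_spec (s : List String) (nb : Int) :
    ∀ (fuel k : Nat) (d : PySem.Dict (List String) Int),
      k + fuel = nb.toNat →
      d.items = (List.range k).map (fun j => (cycle_onceL^[j] s, (j : Int))) →
      (∀ i j : Nat, i < j → j < k → cycle_onceL^[i] s ≠ cycle_onceL^[j] s) →
      cmtLoopA nb (k : Int) (cycle_onceL^[k] s) d = cycle_onceL^[nb.toNat] s := by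
  intro fuel
  induction fuel with
  | zero =>
    intro k d hk hitems hdist
    have hk' : ¬ ((k : Int) < nb) := by omega
    rw [cmtLoopA, dif_neg hk', show k = nb.toNat from by omega]
  | succ fuel ih =>
    intro k d hk hitems hdist
    have hlt : (k : Int) < nb := by omega
    rw [cmtLoopA, dif_pos hlt]
    have hd : d = PySem.Dict.mk ((List.range k).map (fun j => (cycle_onceL^[j] s, (j : Int)))) := by
      apply PySem.Dict.ext; exact hitems
    by_cases hmem : ∃ j, j < k ∧ cycle_onceL^[j] s = cycle_onceL^[k] s
    · obtain ⟨j, hjk, hj⟩ := hmem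
      have hsplit : (List.range k).map (fun j => (cycle_onceL^[j] s, (j : Int)))
          = (List.range j).map (fun j => (cycle_onceL^[j] s, (j : Int)))
            ++ (cycle_onceL^[j] s, (j : Int))
              :: ((List.range (k - j - 1)).map (fun i => j + 1 + i)).map
                   (fun j => (cycle_onceL^[j] s, (j : Int))) := by
        rw [pv_range_split k j hjk]; simp
      have hget : d.get? (cycle_onceL^[k] s) = some (j : Int) := by
        rw [hd, hsplit, hj]
        apply pv_get?_mk_append_self
        intro p hp
        obtain ⟨i, hi, rfl⟩ := List.mem_map.mp hp
        rw [List.mem_range] at hi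
        rw [← hj]
        exact hdist i j hi hjk
      simp only [hget]
      have hn0 : 0 ≤ nb := by omega
      have hfi : PySem.Int.mod (nb - (j : Int)) ((k : Int) - (j : Int)) + (j : Int)
          = ((j + (nb.toNat - j) % (k - j) : Nat) : Int) := by
        rw [PySem.Int.mod_eq_emod_of_pos (by omega)]
        have h1 : ((j + (nb.toNat - j) % (k - j) : Nat) : Int)
            = (j : Int) + ((nb.toNat - j : Nat) : Int) % ((k - j : Nat) : Int) := by
          push_cast [Int.natCast_mod]
          ring
        rw [h1, show ((nb.toNat - j : Nat) : Int) = nb - (j : Int) from by omega,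
            show ((k - j : Nat) : Int) = (k : Int) - (j : Int) from by omega]
        ring
      rw [hfi]
      have hvals : d.values = (List.range k).map (fun (j : Nat) => (j : Int)) := by
        rw [hd]
        show ((List.range k).map (fun j => (cycle_onceL^[j] s, (j : Int)))).map (·.2)
          = (List.range k).map (fun (j : Nat) => (j : Int))
        rw [List.map_map]
        rfl
      have hkeys : d.keys = (List.range k).map (fun j => cycle_onceL^[j] s) := by
        rw [hd]
        show ((List.range k).map (fun j => (cycle_onceL^[j] s, (j : Int)))).map (·.1)
          = (List.range k).map (fun j => cycle_onceL^[j] s)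
        rw [List.map_map]
        rfl
      have hjr : j + (nb.toNat - j) % (k - j) < k := by
        have := Nat.mod_lt (nb.toNat - j) (y := k - j) (by omega); omega
      rw [hvals, pv_index?_map_natCast k _ hjr, hkeys]
      show (PySem.List.pyGet? ((List.range k).map (fun j => cycle_onceL^[j] s))
              ((j + (nb.toNat - j) % (k - j) : Nat) : Int)).getD [] = cycle_onceL^[nb.toNat] s
      rw [PySem.List.pyGet?_natCast, List.getElem?_map, List.getElem?_range hjr]
      show cycle_onceL^[j + (nb.toNat - j) % (k - j)] s = cycle_onceL^[nb.toNat] s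
      apply pv_periodic_shortcut cycle_onceL s j (k - j) nb.toNat (by omega) _ (by omega)
      rw [show j + (k - j) = k from by omega, hj]
    · have hget : d.get? (cycle_onceL^[k] s) = none := by
        rw [hd]
        apply pv_get?_mk_eq_none
        intro p hp
        obtain ⟨i, hi, rfl⟩ := List.mem_map.mp hp
        rw [List.mem_range] at hi
        exact fun h => hmem ⟨i, hi, h⟩
      simp only [hget]
      have hcont : d.contains (cycle_onceL^[k] s) = false :=
        (PySem.Dict.get?_eq_none_iff_contains d _).mp hget
      have hins : (d.insert (cycle_onceL^[k] s) (k : Int)).items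
          = (List.range (k + 1)).map (fun j => (cycle_onceL^[j] s, (j : Int))) := by
        have hfold := PySem.Dict.items_foldl_insert_fresh [cycle_onceL^[k] s]
          (fun a => a) (fun _ => (k : Int)) d (by simpa using hcont) (by simp)
        simp only [List.foldl_cons, List.foldl_nil, List.map_cons, List.map_nil] at hfold
        rw [hfold, hitems, List.range_succ, List.map_append]
        rfl
      have hdist' : ∀ i j : Nat, i < j → j < k + 1 → cycle_onceL^[i] s ≠ cycle_onceL^[j] s := by
        intro i j hij hjk1
        by_cases hjk : j < k
        · exact hdist i j hij hjk
        · have : j = k := by omega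
          subst this
          exact fun h => hmem ⟨i, hij, h⟩
      have hrec := ih (k + 1) (d.insert (cycle_onceL^[k] s) (k : Int)) (by omega) hins hdist'
      rw [show cycle_onceL (cycle_onceL^[k] s) = cycle_onceL^[k + 1] s from
            (Function.iterate_succ_apply' cycle_onceL k s).symm,
          show ((k : Int) + 1) = ((k + 1 : Nat) : Int) from by push_cast; ring]
      exact hrec

theorem pv_A_eq (grid : List String) (nb : Int) :
    cycle_multiple_times grid nb = cycle_onceL^[nb.toNat] grid := by
  have h := pv_loopA_spec grid nb nb.toNat 0 PySem.Dict.empty (by omega) (by rfl)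
    (fun i j h1 h2 => absurd h2 (by omega))
  simpa using h

theorem pv_B_eq (grid : List String) (nb : Int) :
    cycle_multiple_times_alt grid nb = spinB^[nb.toNat] grid := by
  unfold cycle_multiple_times_alt
  rcases pv_meet_spec grid nb.toNat 0 with ⟨t0, ht0pos, ht0le, hmeet, heq⟩ | hmiss
  · simp only [Function.iterate_zero, id_eq, Nat.mul_zero, Function.iterate_zero] at hmeet
    have hmu := pv_mu_spec grid t0 nb.toNat 0 ⟨t0, by omega, by
      rw [show t0 + (0 + t0) = 2 * t0 from by omega, show 0 + t0 = t0 from by omega]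
      exact heq⟩
    obtain ⟨mu, hmu0, hmun, hmueq, hmuper⟩ := hmu
    simp only [Function.iterate_zero, id_eq, Nat.add_zero] at hmueq
    rw [hmeet]
    simp only [hmueq]
    have hlam := pv_lam_spec grid mu nb.toNat 1 (le_refl 1) ⟨t0 - 1, by omega, by
      rw [show mu + (1 + (t0 - 1)) = t0 + mu from by omega]
      exact hmuper.symm⟩
    obtain ⟨lam, hlam1, hlameq, hlamper⟩ := hlam
    rw [show spinB (spinB^[mu] grid) = spinB^[mu + 1] grid from
          (Function.iterate_succ_apply' spinB mu grid).symm, hlameq, if_pos trivial]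
    have hnb : nb = (nb.toNat : Int) := by omega
    have harg : (PySem.Int.mod (nb - (mu : Int)) (lam : Int)).toNat = (nb.toNat - mu) % lam := by
      rw [PySem.Int.mod_eq_emod_of_pos (by omega),
          show nb - (mu : Int) = ((nb.toNat - mu : Nat) : Int) from by omega,
          ]
      norm_cast
    rw [harg, pv_stepsB, ← Function.iterate_add_apply]
    rw [show (nb.toNat - mu) % lam + mu = mu + (nb.toNat - mu) % lam from by omega]
    exact pv_periodic_shortcut spinB grid mu lam nb.toNat (by omega) hlamper (by omega)
  · simp only [Function.iterate_zero, id_eq, Nat.mul_zero, Function.iterate_zero, Nat.zero_add] at hmiss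
    rw [hmiss]
    rfl

-- ===== VERDICT (by name: the statement is the Claim_ definition above) =====
theorem cycle_multiple_times_spec : Claim_equal_cycle_multiple_times := by
  intro grid nb hdom
  unfold Spec_cycle_multiple_times
  rw [pv_A_eq, pv_B_eq, pv_iter_eq nb.toNat grid (pv_good_of_dom grid nb hdom)]
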